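-- pv_equiv track=rewrite | github.com/CristianAmici/python | clase02/diccionario_geringoso.py | diccionario_geringoso
-- ===== SOURCE A (Python) =====
-- def diccionario_geringoso(listaDePalabras):
--    diccionario={}
--    for cadena in listaDePalabras:
--        cadenaFinal=''
--        for c in cadena:
--            cadenaFinal+=c
--            if c=='a':
--                cadenaFinal+= 'pa'
--            elif c=='e':
--                cadenaFinal+= 'pe'
--            elif c=='i':
--                cadenaFinal+= 'pi'
--            elif c=='o':
--                cadenaFinal+= 'po'
--            elif c=='u':
--                cadenaFinal+= 'pu'
--
--        diccionario[cadena]=cadenaFinal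
--    return diccionario
-- ===== SOURCE B (Python) =====
-- def diccionario_geringoso(listaDePalabras):
--     def ger(palabra):
--         for v in 'aeiou':
--             palabra = palabra.replace(v, v + 'p' + v)
--         return palabra
--     return {palabra: ger(palabra) for palabra in listaDePalabras}
-- ===== Notes on version B (the rewrite author's own statement) =====
-- stated objective: idiomatic
-- what changed: B replaces A's per-character accumulation loop (if/elif chain appending 'p'+vowel) by five whole-string replace passes, one per vowel, and builds the mapping with a dict comprehension.
import Mathlib
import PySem

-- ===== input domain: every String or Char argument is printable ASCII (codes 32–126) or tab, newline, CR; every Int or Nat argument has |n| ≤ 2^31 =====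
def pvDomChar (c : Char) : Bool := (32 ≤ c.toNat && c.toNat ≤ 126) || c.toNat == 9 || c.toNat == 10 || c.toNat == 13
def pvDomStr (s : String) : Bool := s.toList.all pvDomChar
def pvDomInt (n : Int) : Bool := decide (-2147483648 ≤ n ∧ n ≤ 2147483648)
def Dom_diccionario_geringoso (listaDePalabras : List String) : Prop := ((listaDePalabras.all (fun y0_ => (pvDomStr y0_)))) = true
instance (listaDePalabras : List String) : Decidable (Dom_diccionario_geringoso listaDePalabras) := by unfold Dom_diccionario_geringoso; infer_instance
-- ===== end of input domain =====

-- B replaces A's per-character accumulation loop by five whole-string replace passes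
-- (one per vowel) and a dict comprehension — same result, more idiomatic ('alternative').

-- ===== PORT A =====
-- A's inner loop body: append c, then the if/elif chain appending 'p'+vowel.
def pvGerAStep (acc : List Char) (c : Char) : List Char :=
  let acc := acc ++ [c]
  if c = 'a' then acc ++ ['p', 'a']
  else if c = 'e' then acc ++ ['p', 'e']
  else if c = 'i' then acc ++ ['p', 'i']
  else if c = 'o' then acc ++ ['p', 'o']
  else if c = 'u' then acc ++ ['p', 'u']
  else acc

def diccionario_geringoso (listaDePalabras : List String) : List (String × String) :=
  (listaDePalabras.foldl
    (fun d cadena => d.insert cadena (String.ofList (cadena.toList.foldl pvGerAStep [])))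
    (PySem.Dict.mk ([] : List (String × String)))).items

-- ===== PORT B =====
-- B's per-word transform: for v in 'aeiou': palabra = palabra.replace(v, v+'p'+v)
def pvGerB (palabra : String) : String :=
  "aeiou".toList.foldl
    (fun r v => PySem.Str.replace r (String.ofList [v]) (String.ofList [v, 'p', v])) palabra

def diccionario_geringoso_alt (listaDePalabras : List String) : List (String × String) :=
  (listaDePalabras.foldl
    (fun d palabra => d.insert palabra (pvGerB palabra))
    (PySem.Dict.mk ([] : List (String × String)))).items

-- ===== PRECONDITION & SPEC =====
def Spec_diccionario_geringoso (listaDePalabras : List String) (out : List (String × String)) : Prop := out = diccionario_geringoso_alt listaDePalabras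
instance (listaDePalabras : List String) (out : List (String × String)) : Decidable (Spec_diccionario_geringoso listaDePalabras out) := by unfold Spec_diccionario_geringoso; infer_instance

-- ===== CLAIM (what is proved, stated in full; the proofs are below) =====
def Claim_equal_diccionario_geringoso : Prop := ∀ (listaDePalabras : List String), Dom_diccionario_geringoso listaDePalabras → Spec_diccionario_geringoso listaDePalabras (diccionario_geringoso listaDePalabras)

-- ===== LEMMAS AND PROOFS =====

-- single-character expansion A performs
def pvExp (c : Char) : List Char :=
  if c = 'a' ∨ c = 'e' ∨ c = 'i' ∨ c = 'o' ∨ c = 'u' then [c, 'p', c] else [c]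

-- single-char replace as a flatMap
def pvRepFn (v : Char) (c : Char) : List Char :=
  if c = v then [v, 'p', v] else [c]

lemma pvGerAStep_eq (acc : List Char) (c : Char) :
    pvGerAStep acc c = acc ++ pvExp c := by
  by_cases ha : c = 'a' <;> by_cases he : c = 'e' <;> by_cases hi : c = 'i' <;>
    by_cases ho : c = 'o' <;> by_cases hu : c = 'u' <;>
  simp_all [pvGerAStep, pvExp]

lemma pvA_inner (l : List Char) (acc : List Char) :
    l.foldl pvGerAStep acc = acc ++ l.flatMap pvExp := by
  induction l generalizing acc with
  | nil => simp
  | cons c t ih => simp [List.foldl_cons, pvGerAStep_eq, ih]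

-- replace with a single-character pattern is a per-character substitution
lemma pvReplace_single (v : Char) (l : List Char) :
    PySem.Chars.replace l [v] [v, 'p', v] = l.flatMap (pvRepFn v) := by
  show PySem.Chars.replace.go [v] [v, 'p', v] l.length l [] = _
  suffices h : ∀ fuel (l acc : List Char), l.length ≤ fuel →
      PySem.Chars.replace.go [v] [v, 'p', v] fuel l acc
        = acc.reverse ++ l.flatMap (pvRepFn v) by
    simpa using h l.length l [] le_rfl
  intro fuel
  induction fuel with
  | zero => intro l acc h; simp at h; simp [h, PySem.Chars.replace.go]
  | succ n ih =>
    intro l acc h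
    cases l with
    | nil => simp [PySem.Chars.replace.go]
    | cons c t =>
      by_cases hc : c = v
      · subst hc
        rw [PySem.Chars.replace.go]
        simp only [List.isPrefixOf, Bool.and_true, beq_self_eq_true,
          if_pos]
        rw [ih]
        · simp [pvRepFn]
        · simpa using Nat.le_of_succ_le_succ h
      · rw [PySem.Chars.replace.go]
        have : [v].isPrefixOf (c :: t) = false := by
          simp [List.isPrefixOf]
          exact fun hh => hc hh.symm
        rw [this]
        simp only [Bool.false_eq_true, if_false]
        rw [ih t (c :: acc) (by simpa using Nat.le_of_succ_le_succ h)]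
        simp [pvRepFn, hc]

-- partial expansion: the vowels in vs already expanded
def pvF (vs : List Char) (c : Char) : List Char :=
  if c ∈ vs then [c, 'p', c] else [c]

-- substituting one more vowel into an already partially expanded word
lemma pvStep_flatMap (v : Char) (vs vs' : List Char) (l : List Char)
    (hvs : vs' = vs ++ [v]) (hv : v ∉ vs) (hp : v ≠ 'p') :
    (l.flatMap (pvF vs)).flatMap (pvRepFn v) = l.flatMap (pvF vs') := by
  subst hvs
  rw [List.flatMap_assoc]
  refine List.flatMap_congr (fun c _ => ?_)
  by_cases hc : c ∈ vs
  · have hcv : c ≠ v := fun h => hv (h ▸ hc)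
    simp [pvF, pvRepFn, hc, hcv, Ne.symm hp]
  · by_cases hcv : c = v
    · subst hcv
      simp [pvF, pvRepFn, hc]
    · simp [pvF, pvRepFn, hc, hcv]

lemma pvB_inner (palabra : String) :
    (pvGerB palabra).toList = palabra.toList.flatMap pvExp := by
  unfold pvGerB
  show ((['a','e','i','o','u'].foldl
      (fun r v => PySem.Str.replace r (String.ofList [v]) (String.ofList [v, 'p', v])) palabra)).toList = _
  simp only [List.foldl_cons, List.foldl_nil, PySem.Str.toList_replace, String.toList_ofList]
  generalize palabra.toList = l
  simp only [pvReplace_single]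
  have h0 : l.flatMap (pvF []) = l := by
    induction l with
    | nil => rfl
    | cons c t ih => simp [pvF, ih]
  have e1 : l.flatMap (pvRepFn 'a') = l.flatMap (pvF ['a']) := by
    conv_lhs => rw [← h0]
    exact pvStep_flatMap 'a' [] ['a'] l rfl (by decide) (by decide)
  rw [e1,
    pvStep_flatMap 'e' ['a'] ['a','e'] l rfl (by decide) (by decide),
    pvStep_flatMap 'i' ['a','e'] ['a','e','i'] l rfl (by decide) (by decide),
    pvStep_flatMap 'o' ['a','e','i'] ['a','e','i','o'] l rfl (by decide) (by decide),
    pvStep_flatMap 'u' ['a','e','i','o'] ['a','e','i','o','u'] l rfl (by decide) (by decide)]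
  refine List.flatMap_congr (fun c _ => ?_)
  simp [pvF, pvExp, List.mem_cons]

lemma pvGer_eq (cadena : String) :
    String.ofList (cadena.toList.foldl pvGerAStep []) = pvGerB cadena := by
  rw [pvA_inner, ← String.ofList_toList (s := pvGerB cadena), pvB_inner]
  simp

-- ===== VERDICT (by name: the statement is the Claim_ definition above) =====
theorem diccionario_geringoso_spec : Claim_equal_diccionario_geringoso := by
  intro l _
  unfold Spec_diccionario_geringoso diccionario_geringoso diccionario_geringoso_alt
  simp only [pvGer_eq]
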